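-- pv_equiv track=rewrite | github.com/ParthJain18/get-me-hired-workflow | modules/resume_generator.py | _normalise_items
-- ===== SOURCE A (Python) =====
-- from typing import Dict, List, Optional, Tuple
--
-- def _escape_latex(text: str) -> str:
--     if not text:
--         return ""
--
--     replacements = [
--         ("&", r"\\&"),
--         ("%", r"\\%"),
--         ("$", r"\\$"),
--         ("#", r"\\#"),
--         ("_", r"\\_"),
--         ("{", r"\\{"),
--         ("}", r"\\}"),
--         ("~", r"\\textasciitilde{}"),
--         ("^", r"\\textasciicircum{}"),
--     ]
--
--     placeholder = "\uFFFF"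
--     escaped = text.replace("\\", placeholder)
--     for old, new in replacements:
--         escaped = escaped.replace(old, new)
--     escaped = escaped.replace(placeholder, r"\\textbackslash{}")
--     return escaped.strip()
--
-- def _normalise_items(items: Optional[List[str]], fallback: List[str], limit: int) -> Tuple[List[str], bool]:
--     if not items:
--         return [_escape_latex(item) for item in fallback[:limit]], False
--
--     cleaned: List[str] = []
--     seen = set()
--     for entry in items:
--         if not entry:
--             continue
--         escaped = _escape_latex(entry)
--         key = escaped.lower()
--         if not escaped or key in seen:
--             continue
--         cleaned.append(escaped)
--         seen.add(key)
--         if len(cleaned) >= limit: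
--             break
--
--     if not cleaned:
--         return [_escape_latex(item) for item in fallback[:limit]], False
--
--     return cleaned, True
-- ===== SOURCE B (Python) =====
-- from typing import Dict, List, Optional, Tuple
--
-- def _escape_latex(text: str) -> str:
--     if not text:
--         return ""
--
--     replacements = [
--         ("&", r"\\&"),
--         ("%", r"\\%"),
--         ("$", r"\\$"),
--         ("#", r"\\#"),
--         ("_", r"\\_"),
--         ("{", r"\\{"),
--         ("}", r"\\}"),
--         ("~", r"\\textasciitilde{}"),
--         ("^", r"\\textasciicircum{}"),
--     ]
--
--     placeholder = "\uFFFF"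
--     escaped = text.replace("\\", placeholder)
--     for old, new in replacements:
--         escaped = escaped.replace(old, new)
--     escaped = escaped.replace(placeholder, r"\\textbackslash{}")
--     return escaped.strip()
--
-- def _normalise_items(items: Optional[List[str]], fallback: List[str], limit: int) -> Tuple[List[str], bool]:
--     # Staged pipeline: escape -> order-preserving dedup on lowercased key -> cap.
--     if items:
--         escaped = [e for e in (_escape_latex(x) for x in items if x) if e]
--         by_key: Dict[str, str] = {}
--         for e in escaped:
--             by_key.setdefault(e.lower(), e)
--         result = list(by_key.values())[:limit]
--         if result:
--             return result, True
--     return [_escape_latex(item) for item in fallback[:limit]], False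
-- ===== Notes on version B (the rewrite author's own statement) =====
-- stated objective: simpler
-- what changed: A's single fused loop with an early break and a seen-set is replaced by a staged pipeline: a comprehension that escapes and drops empties, a dict keyed by the lowercased escape for order-preserving dedup, then a [:limit] cap, with the same fallback branch.
-- intended difference: When limit == 0 and items contains a non-blank entry, A still returns its first escaped item with True (its cap check runs only after an append), while B returns the escaped fallback[:0] = ([], False), the intended meaning of a cap of 0. — e.g. on _normalise_items(some ["a"], [], 0): A returns (["a"], true), B returns ([], false)
-- outside the precondition, e.g. on _normalise_items(['a'], ['f'], -1): A returns (['a'], True), B returns ([], False)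
import Mathlib
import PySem

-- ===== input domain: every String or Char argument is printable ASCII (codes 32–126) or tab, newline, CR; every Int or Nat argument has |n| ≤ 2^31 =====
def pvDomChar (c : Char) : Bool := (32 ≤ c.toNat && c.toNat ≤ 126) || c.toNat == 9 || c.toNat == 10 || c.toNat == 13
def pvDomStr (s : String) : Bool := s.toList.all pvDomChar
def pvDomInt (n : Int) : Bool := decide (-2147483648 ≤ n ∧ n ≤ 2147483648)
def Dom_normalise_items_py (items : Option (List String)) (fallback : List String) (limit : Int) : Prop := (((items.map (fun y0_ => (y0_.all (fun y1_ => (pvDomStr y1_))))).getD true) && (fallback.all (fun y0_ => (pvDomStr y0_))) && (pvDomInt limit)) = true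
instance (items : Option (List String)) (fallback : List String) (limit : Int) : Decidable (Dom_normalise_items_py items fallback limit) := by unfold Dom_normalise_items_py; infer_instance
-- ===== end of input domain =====

-- B replaces A's fused early-exit loop by a staged pipeline (escape/filter, dict-based
-- order-preserving dedup, slice cap); objective: simpler decomposition, no speed claim.

-- ===== PORT A =====
-- shared helper: port of _escape_latex (used verbatim by both Pythons)
def escape_latex (text : String) : String :=
  if text = "" then ""
  else
    let replacements : List (String × String) :=
      [("&", "\\\\&"), ("%", "\\\\%"), ("$", "\\\\$"), ("#", "\\\\#"), ("_", "\\\\_"),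
       ("{", "\\\\{"), ("}", "\\\\}"), ("~", "\\\\textasciitilde{}"), ("^", "\\\\textasciicircum{}")]
    let placeholder : String := "\uFFFF"
    let escaped := PySem.Str.replace text "\\" placeholder
    let escaped := replacements.foldl (fun acc p => PySem.Str.replace acc p.1 p.2) escaped
    let escaped := PySem.Str.replace escaped placeholder "\\\\textbackslash{}"
    PySem.Str.strip escaped

-- A's for-loop with early break, as structural recursion over the same state
def normA_loop (entries : List String) (limit : Int) (cleaned : List String) (seen : PySem.Set String) : List String :=
  match entries with
  | [] => cleaned
  | entry :: rest =>
    if entry = "" then normA_loop rest limit cleaned seen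
    else
      let escaped := escape_latex entry
      let key := PySem.Str.lower escaped
      if escaped = "" ∨ PySem.Set.contains seen key then normA_loop rest limit cleaned seen
      else
        let cleaned' := cleaned ++ [escaped]
        let seen' := PySem.Set.add seen key
        if limit ≤ (cleaned'.length : Int) then cleaned'
        else normA_loop rest limit cleaned' seen'

def normalise_items_py (items : Option (List String)) (fallback : List String) (limit : Int) : List String × Bool :=
  match items with
  | none => ((PySem.List.slice fallback none (some limit)).map escape_latex, false)
  | some l =>
    if l = [] then ((PySem.List.slice fallback none (some limit)).map escape_latex, false)
    else
      let cleaned := normA_loop l limit [] PySem.Set.empty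
      if cleaned = [] then ((PySem.List.slice fallback none (some limit)).map escape_latex, false)
      else (cleaned, true)

-- ===== PORT B =====
def normalise_items_py_alt (items : Option (List String)) (fallback : List String) (limit : Int) : List String × Bool :=
  let fb : List String × Bool := ((PySem.List.slice fallback none (some limit)).map escape_latex, false)
  match items with
  | none => fb
  | some l =>
    if l = [] then fb
    else
      -- escaped = [e for e in (_escape_latex(x) for x in items if x) if e]
      let escaped := ((l.filter (fun x => x ≠ "")).map escape_latex).filter (fun e => e ≠ "")
      -- by_key: insertion-ordered dict, first occurrence wins via setdefault
      let by_key := escaped.foldl (fun d e => PySem.Dict.setdefault d (PySem.Str.lower e) e) PySem.Dict.empty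
      let result := PySem.List.slice (PySem.Dict.values by_key) none (some limit)
      if result ≠ [] then (result, true) else fb

-- ===== PRECONDITION & SPEC =====
-- Pre_ excludes negative limits: a negative cap is outside the function's natural domain
-- (Python then slices from the end and A's break-based cap still returns one item); A does
-- return values there, see claim.json "cites".
def Pre_normalise_items_py (items : Option (List String)) (fallback : List String) (limit : Int) : Prop := 0 ≤ limit
instance (items : Option (List String)) (fallback : List String) (limit : Int) : Decidable (Pre_normalise_items_py items fallback limit) := by unfold Pre_normalise_items_py; infer_instance
def pvWitness_normalise_items_py : Option (List String) × List String × Int := (some ["A&B", "a&b", "c"], ["fb"], 2)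

-- On limit = 0 with an items list holding a non-blank entry, A still returns its first
-- escaped item with True (its cap check runs only after an append), while B returns the
-- escaped fallback[:0] = ([], False) — the intended meaning of a cap of 0.
def D_normalise_items_py (items : Option (List String)) (fallback : List String) (limit : Int) : Prop :=
  limit = 0 ∧ ∃ s ∈ items.getD [], PySem.Str.strip s ≠ ""
instance (items : Option (List String)) (fallback : List String) (limit : Int) : Decidable (D_normalise_items_py items fallback limit) := by unfold D_normalise_items_py; infer_instance
def Spec_normalise_items_py (items : Option (List String)) (fallback : List String) (limit : Int) (out : List String × Bool) : Prop := ¬ D_normalise_items_py items fallback limit → out = normalise_items_py_alt items fallback limit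
instance (items : Option (List String)) (fallback : List String) (limit : Int) (out : List String × Bool) : Decidable (Spec_normalise_items_py items fallback limit out) := by unfold Spec_normalise_items_py; infer_instance
def pvDiffWitness_normalise_items_py : Option (List String) × List String × Int := (some ["a"], [], 0)
def pvDiffWitnessOut_normalise_items_py : (List String × Bool) × (List String × Bool) := ((["a"], true), ([], false))

-- ===== CLAIM (what is proved, stated in full; the proofs are below) =====
def Claim_unchanged_normalise_items_py : Prop := ∀ (items : Option (List String)) (fallback : List String) (limit : Int), Dom_normalise_items_py items fallback limit → Pre_normalise_items_py items fallback limit → Spec_normalise_items_py items fallback limit (normalise_items_py items fallback limit)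
def Claim_changed_normalise_items_py : Prop := Dom_normalise_items_py (pvDiffWitness_normalise_items_py.1) (pvDiffWitness_normalise_items_py.2.1) (pvDiffWitness_normalise_items_py.2.2) ∧ Pre_normalise_items_py (pvDiffWitness_normalise_items_py.1) (pvDiffWitness_normalise_items_py.2.1) (pvDiffWitness_normalise_items_py.2.2) ∧ D_normalise_items_py (pvDiffWitness_normalise_items_py.1) (pvDiffWitness_normalise_items_py.2.1) (pvDiffWitness_normalise_items_py.2.2) ∧ normalise_items_py (pvDiffWitness_normalise_items_py.1) (pvDiffWitness_normalise_items_py.2.1) (pvDiffWitness_normalise_items_py.2.2) = pvDiffWitnessOut_normalise_items_py.1 ∧ normalise_items_py_alt (pvDiffWitness_normalise_items_py.1) (pvDiffWitness_normalise_items_py.2.1) (pvDiffWitness_normalise_items_py.2.2) = pvDiffWitnessOut_normalise_items_py.2 ∧ pvDiffWitnessOut_normalise_items_py.1 ≠ pvDiffWitnessOut_normalise_items_py.2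
def Claim_exact_normalise_items_py : Prop := ∀ (items : Option (List String)) (fallback : List String) (limit : Int), Dom_normalise_items_py items fallback limit → Pre_normalise_items_py items fallback limit → D_normalise_items_py items fallback limit → normalise_items_py items fallback limit ≠ normalise_items_py_alt items fallback limit

-- ===== LEMMAS AND PROOFS =====

-- abstract first-occurrence dedup of the already-escaped list
def dproc (es : List String) (seen : PySem.Set String) : List String :=
  match es with
  | [] => []
  | e :: r =>
    if PySem.Set.contains seen (PySem.Str.lower e) then dproc r seen
    else e :: dproc r (PySem.Set.add seen (PySem.Str.lower e))

-- A's loop computes cleaned ++ (first-occurrence dedup of the rest), capped k+1 entries short of limit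
theorem normA_loop_eq (entries : List String) (limit : Int) :
    ∀ (cleaned : List String) (seen : PySem.Set String) (k : Nat),
      limit = (cleaned.length : Int) + (k + 1) →
      normA_loop entries limit cleaned seen =
        cleaned ++ (dproc (((entries.filter (fun x => x ≠ "")).map escape_latex).filter (fun e => e ≠ "")) seen).take (k + 1) := by
  induction entries with
  | nil => intro cleaned seen k h; simp [normA_loop, dproc]
  | cons entry rest ih =>
    intro cleaned seen k h
    by_cases he : entry = ""
    · simp [normA_loop, he, ih _ _ _ h]
    · by_cases hesc : escape_latex entry = ""
      · simp [normA_loop, he, hesc, ih _ _ _ h]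
      · by_cases hseen : PySem.Str.lower (escape_latex entry) ∈ seen
        · have hc : PySem.Set.contains seen (PySem.Str.lower (escape_latex entry)) = true := by
            simpa using hseen
          simp [normA_loop, he, hesc, hc, hseen, dproc, ih _ _ _ h]
        · have hc : PySem.Set.contains seen (PySem.Str.lower (escape_latex entry)) = false := by
            simpa using hseen
          match k with
          | 0 =>
            have hlim : limit ≤ ((cleaned ++ [escape_latex entry]).length : Int) := by
              simp [List.length_append]; omega
            simp only [normA_loop, he, hesc, hc, dproc, hseen]
            simp [normA_loop, he, hesc, hc, hseen, dproc, hlim, show limit ≤ (cleaned.length : Int) + 1 by omega]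
          | k' + 1 =>
            have hlim : ¬ limit ≤ ((cleaned ++ [escape_latex entry]).length : Int) := by
              simp [List.length_append]; omega
            have h' : limit = (((cleaned ++ [escape_latex entry]).length : Int)) + (k' + 1) := by
              simp [List.length_append]; omega
            simp [normA_loop, he, hesc, hc, hseen, dproc, show ¬ limit ≤ (cleaned.length : Int) + 1 by omega,
              ih _ _ _ h']

-- the setdefault fold's values are the first-occurrence dedup
theorem values_foldl_setdefault (es : List String) :
    ∀ (d : PySem.Dict String String) (seen : PySem.Set String),
      (∀ k, PySem.Dict.contains d k = PySem.Set.contains seen k) →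
      PySem.Dict.values (es.foldl (fun d e => PySem.Dict.setdefault d (PySem.Str.lower e) e) d) =
        PySem.Dict.values d ++ dproc es seen := by
  induction es with
  | nil => intro d seen hk; simp [dproc]
  | cons e r ih =>
    intro d seen hk
    by_cases hs : PySem.Set.contains seen (PySem.Str.lower e) = true
    · have hc : PySem.Dict.contains d (PySem.Str.lower e) = true := by rw [hk]; exact hs
      simp only [List.foldl_cons, PySem.Dict.setdefault_of_contains _ _ hc, dproc, hs, if_true]
      exact ih d seen hk
    · simp only [Bool.not_eq_true] at hs
      have hc : PySem.Dict.contains d (PySem.Str.lower e) = false := by rw [hk]; exact hs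
      simp only [List.foldl_cons, PySem.Dict.setdefault_of_not_contains _ _ hc, dproc, hs,
        Bool.false_eq_true, if_false]
      rw [ih (PySem.Dict.insert d (PySem.Str.lower e) e) (PySem.Set.add seen (PySem.Str.lower e))
        (by
          intro k
          rw [PySem.Dict.contains_insert, hk k, Bool.eq_iff_iff]
          simp [PySem.Set.contains_iff, PySem.Set.mem_add, or_comm])]
      simp [PySem.Dict.values, PySem.Dict.items_insert_of_not_contains _ _ hc]


-- a non-whitespace character survives replace (used for the tight claim)
theorem go_exists (old new : List Char) (Hnew : ∃ c ∈ new, ¬ (PySem.Chars.isspace c = true)) :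
    ∀ (fuel : Nat) (l acc : List Char), (∃ c ∈ l ++ acc, ¬ (PySem.Chars.isspace c = true)) →
      ∃ c ∈ PySem.Chars.replace.go old new fuel l acc, ¬ (PySem.Chars.isspace c = true) := by
  intro fuel
  induction fuel with
  | zero => intro l acc h; rw [PySem.Chars.replace.go]; simpa [or_comm] using h
  | succ n ih =>
    intro l acc h
    match l with
    | [] =>
      rw [PySem.Chars.replace.go]
      · simpa using h
      · omega
    | c :: t =>
      rw [PySem.Chars.replace.go]
      split_ifs with hp
      · apply ih
        obtain ⟨w, hw, hws⟩ := Hnew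
        exact ⟨w, by simp [hw], hws⟩
      · apply ih
        obtain ⟨w, hw, hws⟩ := h
        refine ⟨w, ?_, hws⟩
        simp at hw ⊢
        tauto

theorem replace_exists (s old new : List Char) (hold : old ≠ [])
    (Hnew : ∃ c ∈ new, ¬ (PySem.Chars.isspace c = true))
    (hs : ∃ c ∈ s, ¬ (PySem.Chars.isspace c = true)) :
    ∃ c ∈ PySem.Chars.replace s old new, ¬ (PySem.Chars.isspace c = true) := by
  rw [PySem.Chars.replace]
  rw [if_neg (by simpa using hold)]
  exact go_exists old new Hnew s.length s [] (by simpa using hs)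

theorem strip_ne_nil (s : List Char) (hs : ∃ c ∈ s, ¬ (PySem.Chars.isspace c = true)) :
    PySem.Chars.strip s ≠ [] := by
  rw [PySem.Chars.strip, PySem.Chars.rstrip, PySem.Chars.lstrip]
  obtain ⟨c, hc, hcs⟩ := hs
  intro h
  rw [List.reverse_eq_nil_iff, List.dropWhile_eq_nil_iff] at h
  have h2 : c ∈ List.dropWhile PySem.Chars.isspace s ∨ c ∈ List.takeWhile PySem.Chars.isspace s := by
    have := List.takeWhile_append_dropWhile (p := PySem.Chars.isspace) (l := s)
    rw [← this] at hc; simpa [or_comm] using (List.mem_append.mp hc)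
  rcases h2 with h2 | h2
  · exact hcs (h c (by simpa using h2))
  · exact hcs (List.mem_takeWhile_imp h2)

theorem strip_eq_nil (s : List Char) (hs : ∀ c ∈ s, PySem.Chars.isspace c = true) :
    PySem.Chars.strip s = [] := by
  rw [PySem.Chars.strip, PySem.Chars.rstrip, PySem.Chars.lstrip]
  have h1 : List.dropWhile PySem.Chars.isspace s = [] := List.dropWhile_eq_nil_iff.mpr hs
  simp [h1]

theorem toList_nil_imp (s : String) (h : s.toList = []) : s = "" := by
  have := congrArg String.ofList h
  simpa using this

theorem str_strip_ne_imp (s : String) (h : PySem.Str.strip s ≠ "") :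
    ∃ c ∈ s.toList, ¬ (PySem.Chars.isspace c = true) := by
  by_contra hall
  push_neg at hall
  apply h
  have : (PySem.Str.strip s).toList = [] := by
    rw [PySem.Str.toList_strip]
    exact strip_eq_nil _ (by simpa using hall)
  exact toList_nil_imp _ this

theorem str_replace_exists (t old new : String) (h1 : old.toList ≠ [])
    (h2 : ∃ c ∈ new.toList, ¬ (PySem.Chars.isspace c = true))
    (h3 : ∃ c ∈ t.toList, ¬ (PySem.Chars.isspace c = true)) :
    ∃ c ∈ (PySem.Str.replace t old new).toList, ¬ (PySem.Chars.isspace c = true) := by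
  rw [PySem.Str.toList_replace]
  exact replace_exists _ _ _ h1 h2 h3

theorem escape_ne_empty (s : String) (hs : ∃ c ∈ s.toList, ¬ (PySem.Chars.isspace c = true)) :
    escape_latex s ≠ "" := by
  have hne : s ≠ "" := by rintro rfl; simp at hs
  unfold escape_latex
  rw [if_neg hne]
  simp only [List.foldl]
  have h1 := str_replace_exists s "\\" "\uFFFF" (by decide) ⟨'\uFFFF', by decide, by decide⟩ hs
  have h2 := str_replace_exists _ "&" "\\\\&" (by decide) ⟨'\\', by decide, by decide⟩ h1
  have h3 := str_replace_exists _ "%" "\\\\%" (by decide) ⟨'\\', by decide, by decide⟩ h2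
  have h4 := str_replace_exists _ "$" "\\\\$" (by decide) ⟨'\\', by decide, by decide⟩ h3
  have h5 := str_replace_exists _ "#" "\\\\#" (by decide) ⟨'\\', by decide, by decide⟩ h4
  have h6 := str_replace_exists _ "_" "\\\\_" (by decide) ⟨'\\', by decide, by decide⟩ h5
  have h7 := str_replace_exists _ "{" "\\\\{" (by decide) ⟨'\\', by decide, by decide⟩ h6
  have h8 := str_replace_exists _ "}" "\\\\}" (by decide) ⟨'\\', by decide, by decide⟩ h7
  have h9 := str_replace_exists _ "~" "\\\\textasciitilde{}" (by decide) ⟨'\\', by decide, by decide⟩ h8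
  have h10 := str_replace_exists _ "^" "\\\\textasciicircum{}" (by decide) ⟨'\\', by decide, by decide⟩ h9
  have h11 := str_replace_exists _ "\uFFFF" "\\\\textbackslash{}" (by decide) ⟨'\\', by decide, by decide⟩ h10
  intro hcontr
  have hl : (PySem.Str.strip (PySem.Str.replace (PySem.Str.replace (PySem.Str.replace (PySem.Str.replace (PySem.Str.replace (PySem.Str.replace (PySem.Str.replace (PySem.Str.replace (PySem.Str.replace (PySem.Str.replace (PySem.Str.replace s "\\" "\uFFFF") "&" "\\\\&") "%" "\\\\%") "$" "\\\\$") "#" "\\\\#") "_" "\\\\_") "{" "\\\\{") "}" "\\\\}") "~" "\\\\textasciitilde{}") "^" "\\\\textasciicircum{}") "\uFFFF" "\\\\textbackslash{}")).toList = [] := by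
    rw [hcontr]; rfl
  rw [PySem.Str.toList_strip] at hl
  exact strip_ne_nil _ h11 hl

theorem normA_loop_ne_nil (limit : Int) (hlim : limit ≤ 0) :
    ∀ (l : List String), (∃ s ∈ l, PySem.Str.strip s ≠ "") →
      normA_loop l limit [] PySem.Set.empty ≠ [] := by
  intro l
  induction l with
  | nil => intro h; simp at h
  | cons s t ih =>
    intro h
    by_cases hesc : escape_latex s = ""
    · have hsblank : ¬ (PySem.Str.strip s ≠ "") := by
        intro hnb
        exact escape_ne_empty s (str_strip_ne_imp s hnb) hesc
      have hwit : ∃ x ∈ t, PySem.Str.strip x ≠ "" := by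
        obtain ⟨x, hx, hxs⟩ := h
        rcases List.mem_cons.mp hx with rfl | hx'
        · exact absurd hxs hsblank
        · exact ⟨x, hx', hxs⟩
      by_cases hs0 : s = ""
      · simpa [normA_loop, hs0] using ih hwit
      · simpa [normA_loop, hs0, hesc] using ih hwit
    · have hs0 : s ≠ "" := by
        intro h0; exact hesc (by rw [h0]; rfl)
      have hcont : PySem.Set.contains PySem.Set.empty (PySem.Str.lower (escape_latex s)) = false := rfl
      have h1 : limit ≤ (1 : Int) := by omega
      simp [normA_loop, hs0, hesc, hcont, h1]


-- whitespace-only strings stay whitespace-only through replace, so their escape is ""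
theorem go_all_space (o : Char) (os : List Char) (ho : ¬ (PySem.Chars.isspace o = true)) (new : List Char) :
    ∀ (fuel : Nat) (l acc : List Char), (∀ c ∈ l, PySem.Chars.isspace c = true) →
      (∀ c ∈ acc, PySem.Chars.isspace c = true) →
      ∀ c ∈ PySem.Chars.replace.go (o :: os) new fuel l acc, PySem.Chars.isspace c = true := by
  intro fuel
  induction fuel with
  | zero =>
    intro l acc hl hacc
    rw [PySem.Chars.replace.go]
    intro c hc
    rcases List.mem_append.mp hc with h | h
    · exact hacc _ (List.mem_reverse.mp h)
    · exact hl _ h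
  | succ n ih =>
    intro l acc hl hacc
    match l with
    | [] =>
      rw [PySem.Chars.replace.go]
      · intro c hc; exact hacc _ (List.mem_reverse.mp hc)
      · omega
    | c :: t =>
      rw [PySem.Chars.replace.go]
      have hoc : o ≠ c := by
        intro h; exact ho (h ▸ hl c (List.mem_cons_self))
      rw [if_neg (by simp [List.isPrefixOf]; intro h; exact absurd h hoc)]
      exact ih t (c :: acc)
        (fun x hx => hl x (List.mem_cons_of_mem _ hx))
        (fun x hx => by
          rcases List.mem_cons.mp hx with rfl | hx'
          · exact hl x (List.mem_cons_self)
          · exact hacc x hx')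

theorem str_replace_blank (t old new : String) (o : Char) (hol : old.toList = [o])
    (ho : ¬ (PySem.Chars.isspace o = true))
    (ht : ∀ c ∈ t.toList, PySem.Chars.isspace c = true) :
    ∀ c ∈ (PySem.Str.replace t old new).toList, PySem.Chars.isspace c = true := by
  rw [PySem.Str.toList_replace, hol, PySem.Chars.replace]
  rw [if_neg (by simp)]
  exact go_all_space o [] ho _ _ _ _ ht (by simp)

theorem strip_eq_imp (s : String) (h : PySem.Str.strip s = "") :
    ∀ c ∈ s.toList, PySem.Chars.isspace c = true := by
  by_contra hall
  push_neg at hall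
  obtain ⟨c, hc, hcs⟩ := hall
  have h1 : (PySem.Str.strip s).toList = [] := by rw [h]; rfl
  rw [PySem.Str.toList_strip] at h1
  exact strip_ne_nil s.toList ⟨c, hc, hcs⟩ h1

theorem escape_blank (s : String) (hall : ∀ c ∈ s.toList, PySem.Chars.isspace c = true) :
    escape_latex s = "" := by
  by_cases hs0 : s = ""
  · rw [hs0]; rfl
  · unfold escape_latex
    rw [if_neg hs0]
    simp only [List.foldl]
    have g1 := str_replace_blank s "\\" "\uFFFF" '\\' (by decide) (by decide) hall
    have g2 := str_replace_blank _ "&" "\\\\&" '&' (by decide) (by decide) g1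
    have g3 := str_replace_blank _ "%" "\\\\%" '%' (by decide) (by decide) g2
    have g4 := str_replace_blank _ "$" "\\\\$" '$' (by decide) (by decide) g3
    have g5 := str_replace_blank _ "#" "\\\\#" '#' (by decide) (by decide) g4
    have g6 := str_replace_blank _ "_" "\\\\_" '_' (by decide) (by decide) g5
    have g7 := str_replace_blank _ "{" "\\\\{" '{' (by decide) (by decide) g6
    have g8 := str_replace_blank _ "}" "\\\\}" '}' (by decide) (by decide) g7
    have g9 := str_replace_blank _ "~" "\\\\textasciitilde{}" '~' (by decide) (by decide) g8
    have g10 := str_replace_blank _ "^" "\\\\textasciicircum{}" '^' (by decide) (by decide) g9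
    have g11 := str_replace_blank _ "\uFFFF" "\\\\textbackslash{}" '\uFFFF' (by decide) (by decide) g10
    apply toList_nil_imp
    rw [PySem.Str.toList_strip]
    exact strip_eq_nil _ g11

theorem normA_loop_blank : ∀ (l : List String) (limit : Int) (cleaned : List String) (seen : PySem.Set String),
    (∀ s ∈ l, escape_latex s = "") → normA_loop l limit cleaned seen = cleaned := by
  intro l
  induction l with
  | nil => intro limit cleaned seen _; rfl
  | cons s t ih =>
    intro limit cleaned seen hall
    have htail : ∀ x ∈ t, escape_latex x = "" := fun x hx => hall x (List.mem_cons_of_mem _ hx)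
    by_cases hs0 : s = ""
    · simp [normA_loop, hs0, ih limit cleaned seen htail]
    · have hesc : escape_latex s = "" := hall s (List.mem_cons_self)
      simp [normA_loop, hs0, hesc, ih limit cleaned seen htail]

-- ===== VERDICT (by name: the statement is the Claim_ definition above) =====
theorem normalise_items_py_spec : Claim_unchanged_normalise_items_py := by
  intro items fallback limit _hdom hpre hnd
  have hpre' : (0:Int) ≤ limit := hpre
  match items with
  | none => rfl
  | some l =>
    by_cases hl : l = []
    · simp [normalise_items_py, normalise_items_py_alt, hl]
    · by_cases hlim0 : limit = 0
      · subst hlim0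
        have hall : ∀ s ∈ l, escape_latex s = "" := by
          intro s hs
          by_cases hblank : PySem.Str.strip s = ""
          · exact escape_blank s (strip_eq_imp s hblank)
          · exact absurd ⟨rfl, s, by simpa using hs, hblank⟩ hnd
        have hA0 : normA_loop l 0 [] ([] : PySem.Set String) = [] :=
          normA_loop_blank l 0 [] ([] : PySem.Set String) hall
        have hAeq : normalise_items_py (some l) fallback 0 =
            ((PySem.List.slice fallback none (some 0)).map escape_latex, false) := by
          simp [normalise_items_py, hl, hA0]
        have hsl : PySem.List.slice (PySem.Dict.values ((((l.filter (fun x => x ≠ "")).map escape_latex).filter (fun e => e ≠ "")).foldl (fun d e => PySem.Dict.setdefault d (PySem.Str.lower e) e) PySem.Dict.empty)) none (some (0 : Int)) = [] := by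
          rw [PySem.List.slice_to _ le_rfl]
          simp
        simp only [ne_eq, decide_not] at hsl
        have hBeq : normalise_items_py_alt (some l) fallback 0 =
            ((PySem.List.slice fallback none (some 0)).map escape_latex, false) := by
          simp [normalise_items_py_alt, hl, hsl]
        rw [hAeq, hBeq]
      · have hlim : 0 < limit := by
          have : (0:Int) ≤ limit := hpre
          omega
        have hA := normA_loop_eq l limit [] PySem.Set.empty (limit.toNat - 1) (by simp; omega)
        have hB := values_foldl_setdefault
          (((l.filter (fun x => x ≠ "")).map escape_latex).filter (fun e => e ≠ ""))
          PySem.Dict.empty PySem.Set.empty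
          (by intro k; simp [PySem.Dict.contains_empty, PySem.Set.empty, PySem.Set.contains])
        simp only [normalise_items_py, normalise_items_py_alt, hl, if_neg hl]
        have hk : limit.toNat - 1 + 1 = limit.toNat := by omega
        rw [hk] at hA
        simp only [List.nil_append] at hA hB
        simp only [ne_eq, decide_not] at hA hB ⊢
        rw [hA, hB]
        simp only [PySem.Dict.values, PySem.Dict.items, List.map_nil, List.nil_append]
        rw [PySem.List.slice_to _ hpre']
        have hnle : ¬ limit ≤ 0 := by omega
        by_cases hP : dproc (List.filter (fun e => !decide (e = ""))
            (List.map escape_latex (List.filter (fun e => !decide (e = "")) l))) [] = []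
        · simp [hP, PySem.Dict.values, PySem.Dict.items, PySem.Dict.empty, PySem.List.slice_to _ hpre']
        · have htake : List.take limit.toNat (dproc (List.filter (fun e => !decide (e = ""))
              (List.map escape_latex (List.filter (fun e => !decide (e = "")) l))) []) ≠ [] := by
            rw [Ne, List.take_eq_nil_iff]
            push_neg
            exact ⟨by omega, hP⟩
          simp [hP, hnle, htake, PySem.Dict.values, PySem.Dict.items, PySem.Dict.empty, PySem.List.slice_to _ hpre']

set_option maxRecDepth 100000 in
theorem normalise_items_py_changed : Claim_changed_normalise_items_py := by
  unfold Claim_changed_normalise_items_py; decide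

theorem normalise_items_py_tight : Claim_exact_normalise_items_py := by
  intro items fallback limit _hdom _hpre hd heq
  obtain ⟨hlim, s, hsmem, hsnb⟩ := hd
  subst hlim
  match items with
  | none => simp at hsmem
  | some l =>
    have hl : l ≠ [] := by rintro rfl; simp at hsmem
    have hcl : normA_loop l 0 [] PySem.Set.empty ≠ [] :=
      normA_loop_ne_nil 0 le_rfl l ⟨s, by simpa using hsmem, hsnb⟩
    have hcl' : normA_loop l 0 [] ([] : PySem.Set String) ≠ [] := hcl
    have hA : (normalise_items_py (some l) fallback 0).2 = true := by
      simp [normalise_items_py, hl, hcl']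
    have hB : (normalise_items_py_alt (some l) fallback 0).2 = false := by
      have hsl : PySem.List.slice (PySem.Dict.values ((((l.filter (fun x => x ≠ "")).map escape_latex).filter (fun e => e ≠ "")).foldl (fun d e => PySem.Dict.setdefault d (PySem.Str.lower e) e) PySem.Dict.empty)) none (some (0 : Int)) = [] := by
        rw [PySem.List.slice_to _ le_rfl]
        simp
      simp only [ne_eq, decide_not] at hsl
      simp [normalise_items_py_alt, hl, hsl]
    rw [heq, hB] at hA
    exact Bool.false_ne_true hA
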